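-- pv_equiv track=rewrite | github.com/Arsen1302/Code-copy-detector | TestData/solutions/problem_514_5.py | solution_514_5
-- ===== SOURCE A (Python) =====
-- from typing import List
--
-- def solution_514_5(difficulty: List[int], profit: List[int], worker: List[int]) -> int:
--
--     res = 0
--     for i in range(len(worker)):
--         max_p = 0
--         for j in range(len(difficulty)):
--             if difficulty[j] <= worker[i]:
--                 max_p = max(max_p, profit[j])
--         res += max_p
--
--     return res
-- ===== SOURCE B (Python) =====
-- from typing import List
--
-- def _bisect_right(a: List[int], x: int) -> int:
--     # classic binary search: number of elements <= x in sorted list a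
--     lo, hi = 0, len(a)
--     while lo < hi:
--         mid = (lo + hi) // 2
--         if x < a[mid]:
--             hi = mid
--         else:
--             lo = mid + 1
--     return lo
--
-- def solution_514_5(difficulty: List[int], profit: List[int], worker: List[int]) -> int:
--     jobs = sorted(zip(difficulty, profit), key=lambda t: t[0])
--     ds = [d for d, _ in jobs]
--     best = []
--     cur = 0
--     for _, p in jobs:
--         cur = max(cur, p)
--         best.append(cur)
--     total = 0
--     for w in worker:
--         k = _bisect_right(ds, w)
--         total += best[k - 1] if k else 0
--     return total
-- ===== Notes on version B (the rewrite author's own statement) =====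
-- stated objective: faster
-- what changed: Replaces the per-worker full scan of all jobs by sort-by-difficulty + running prefix maxima + a binary search per worker.
import Mathlib
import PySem

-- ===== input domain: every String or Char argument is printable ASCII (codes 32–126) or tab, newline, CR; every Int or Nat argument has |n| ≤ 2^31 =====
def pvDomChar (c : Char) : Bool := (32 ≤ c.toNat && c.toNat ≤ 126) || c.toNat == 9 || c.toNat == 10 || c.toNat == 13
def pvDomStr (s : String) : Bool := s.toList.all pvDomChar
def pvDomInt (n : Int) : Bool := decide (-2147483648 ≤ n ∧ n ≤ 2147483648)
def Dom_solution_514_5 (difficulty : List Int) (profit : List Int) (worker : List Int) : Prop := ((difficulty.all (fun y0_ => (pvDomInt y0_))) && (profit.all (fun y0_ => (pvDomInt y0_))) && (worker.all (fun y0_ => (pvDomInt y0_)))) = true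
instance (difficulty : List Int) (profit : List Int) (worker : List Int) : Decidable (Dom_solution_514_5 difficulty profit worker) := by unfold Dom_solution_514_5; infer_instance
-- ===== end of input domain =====

-- B replaces A's per-worker scan of every job by sort-by-difficulty + prefix maxima + one binary search per worker (measurably faster, asymptotically O((W+D) log D) vs O(W*D)); equivalence of return values is proved on Pre_ (exactly where A returns).

-- ===== PORT A =====
def solution_514_5 (difficulty : List Int) (profit : List Int) (worker : List Int) : Int :=
  (PySem.List.pyRange 0 worker.length 1).foldl (fun res i =>
    res + (PySem.List.pyRange 0 difficulty.length 1).foldl (fun max_p j =>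
      if PySem.List.pyGetD difficulty j 0 ≤ PySem.List.pyGetD worker i 0 then
        max max_p (PySem.List.pyGetD profit j 0)
      else max_p) 0) 0

-- ===== PORT B =====
-- hand-written binary search in Source B is exactly CPython's bisect_right loop = PySem.List.bisectRight
def solution_514_5_alt (difficulty : List Int) (profit : List Int) (worker : List Int) : Int :=
  let jobs := PySem.List.sorted (difficulty.zip profit) (fun t => t.1) false
  let ds := jobs.map (fun t => t.1)
  let best := (jobs.foldl (fun (st : Int × List Int) tp =>
      let cur := max st.1 tp.2
      (cur, st.2 ++ [cur])) ((0 : Int), ([] : List Int))).2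
  worker.foldl (fun total w =>
    let k := PySem.List.bisectRight ds w
    total + (if k ≠ 0 then PySem.List.pyGetD best ((k : Int) - 1) 0 else 0)) 0

-- ===== PRECONDITION & SPEC =====
-- Pre_ is exactly the inputs on which A returns normally: A raises IndexError iff some job
-- index j ≥ len(profit) has difficulty[j] ≤ some worker's ability (only then profit[j] is read).
def Pre_solution_514_5 (difficulty : List Int) (profit : List Int) (worker : List Int) : Prop :=
  ∀ d ∈ difficulty.drop profit.length, ∀ w ∈ worker, ¬ (d ≤ w)
instance (difficulty : List Int) (profit : List Int) (worker : List Int) : Decidable (Pre_solution_514_5 difficulty profit worker) := by unfold Pre_solution_514_5; infer_instance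
def pvWitness_solution_514_5 : List Int × List Int × List Int := ([1, 2], [3, 4], [2])

def Spec_solution_514_5 (difficulty : List Int) (profit : List Int) (worker : List Int) (out : Int) : Prop := out = solution_514_5_alt difficulty profit worker
instance (difficulty : List Int) (profit : List Int) (worker : List Int) (out : Int) : Decidable (Spec_solution_514_5 difficulty profit worker out) := by unfold Spec_solution_514_5; infer_instance

-- ===== CLAIM (what is proved, stated in full; the proofs are below) =====
def Claim_equal_solution_514_5 : Prop := ∀ (difficulty : List Int) (profit : List Int) (worker : List Int), Dom_solution_514_5 difficulty profit worker → Pre_solution_514_5 difficulty profit worker → Spec_solution_514_5 difficulty profit worker (solution_514_5 difficulty profit worker)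
-- ===== LEMMAS AND PROOFS =====

-- the best-profit accumulator of A's inner loop, as a fold over (difficulty, profit) pairs
def pvStep (w : Int) (m : Int) (x : Int × Int) : Int := if x.1 ≤ w then max m x.2 else m

-- prefix maxima of the second components (B's `best` list)
def pvPrefMax (a : Int) : List (Int × Int) → List Int
  | [] => []
  | x :: xs => (max a x.2) :: pvPrefMax (max a x.2) xs

theorem pvStep_rc (w : Int) (b : Int) (x y : Int × Int) :
    pvStep w (pvStep w b x) y = pvStep w (pvStep w b y) x := by
  unfold pvStep; split_ifs <;> simp [max_left_comm, max_comm]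

theorem pvFoldl_perm (w : Int) {l₁ l₂ : List (Int × Int)} (h : l₁.Perm l₂) (a : Int) :
    l₁.foldl (pvStep w) a = l₂.foldl (pvStep w) a := by
  letI : Std.Commutative (fun (x y : Int × Int) => (0 : Int)) := ⟨fun _ _ => rfl⟩
  exact h.foldl_eq (rcomm := ⟨pvStep_rc w⟩) a

theorem pvFoldl_all_le (w : Int) (l : List (Int × Int)) (a : Int)
    (h : ∀ x ∈ l, x.1 ≤ w) :
    l.foldl (pvStep w) a = (l.map (fun t => t.2)).foldl max a := by
  induction l generalizing a with
  | nil => rfl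
  | cons x xs ih =>
    simp only [List.foldl_cons, List.map_cons, pvStep, if_pos (h x (by simp))]
    exact ih _ (fun y hy => h y (by simp [hy]))

theorem pvFoldl_all_gt (w : Int) (l : List (Int × Int)) (a : Int)
    (h : ∀ x ∈ l, ¬ x.1 ≤ w) :
    l.foldl (pvStep w) a = a := by
  induction l generalizing a with
  | nil => rfl
  | cons x xs ih =>
    simp only [List.foldl_cons, pvStep, if_neg (h x (by simp))]
    exact ih _ (fun y hy => h y (by simp [hy]))

theorem pvPrefMax_length (a : Int) (l : List (Int × Int)) :
    (pvPrefMax a l).length = l.length := by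
  induction l generalizing a with
  | nil => rfl
  | cons x xs ih => simp [pvPrefMax, ih]

theorem pvPrefMax_getElem (l : List (Int × Int)) (a : Int) (i : Nat) (hi : i < l.length)
    (hi' : i < (pvPrefMax a l).length) :
    (pvPrefMax a l)[i] = ((l.take (i + 1)).map (fun t => t.2)).foldl max a := by
  induction l generalizing a i with
  | nil => simp at hi
  | cons x xs ih =>
    cases i with
    | zero => simp [pvPrefMax]
    | succ i =>
      simp only [pvPrefMax, List.getElem_cons_succ, List.take_succ_cons, List.map_cons,
        List.foldl_cons]
      exact ih _ i (by simpa using hi) (by simpa [pvPrefMax_length] using hi)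

theorem pvBest_eq (l : List (Int × Int)) (a : Int) (acc : List Int) :
    (l.foldl (fun (st : Int × List Int) tp =>
      let cur := max st.1 tp.2
      (cur, st.2 ++ [cur])) (a, acc)).2 = acc ++ pvPrefMax a l := by
  induction l generalizing a acc with
  | nil => simp [pvPrefMax]
  | cons x xs ih => simp [pvPrefMax, ih]

theorem pvFoldl_id (l : List Int) (a : Int) : l.foldl (fun m (_ : Int) => m) a = a := by
  induction l <;> simp [List.foldl, *]

-- A's inner loop over indices equals the fold over the zipped pairs, on inputs where A returns
theorem pvInner_eq (difficulty profit : List Int) (w : Int)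
    (hpre : ∀ d ∈ difficulty.drop profit.length, ¬ (d ≤ w)) :
    (PySem.List.pyRange 0 difficulty.length 1).foldl (fun max_p j =>
      if PySem.List.pyGetD difficulty j 0 ≤ w then
        max max_p (PySem.List.pyGetD profit j 0)
      else max_p) 0 = (difficulty.zip profit).foldl (pvStep w) 0 := by
  have hcongr : ∀ (acc : Int), ∀ j ∈ PySem.List.pyRange 0 ((difficulty.zip profit).length : Int) 1,
      (if PySem.List.pyGetD difficulty j 0 ≤ w then
        max acc (PySem.List.pyGetD profit j 0) else acc)
      = pvStep w acc (PySem.List.pyGetD (difficulty.zip profit) j (0, 0)) := by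
    intro acc j hj
    obtain ⟨hj0, hj1⟩ := PySem.List.mem_pyRange_one.1 hj
    have hlz : (difficulty.zip profit).length = min difficulty.length profit.length := by
      simp
    have hjd : j < (difficulty.length : Int) := by omega
    have hjp : j < (profit.length : Int) := by omega
    rw [PySem.List.pyGetD_eq_getElem difficulty 0 hj0 hjd,
      PySem.List.pyGetD_eq_getElem profit 0 hj0 hjp,
      PySem.List.pyGetD_eq_getElem (difficulty.zip profit) (0, 0) hj0 hj1]
    rw [List.getElem_zip]
    rfl
  by_cases h : difficulty.length ≤ profit.length
  · have hlen : ((difficulty.zip profit).length : Int) = (difficulty.length : Int) := by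
      simp; omega
    rw [show ((difficulty.length : Int)) = ((difficulty.zip profit).length : Int) from hlen.symm]
    rw [PySem.List.foldl_congr_mem _ _ _ _ hcongr]
    exact PySem.List.foldl_pyRange_zero_pyGetD' (difficulty.zip profit) (0, 0) (pvStep w) 0
  · have h' : profit.length < difficulty.length := by omega
    have hlen : ((difficulty.zip profit).length : Int) = (profit.length : Int) := by
      simp; omega
    rw [PySem.List.pyRange_one_append 0 profit.length difficulty.length (by positivity)
      (by exact_mod_cast Nat.le_of_lt h')]
    rw [List.foldl_append]
    rw [show ((profit.length : Int)) = ((difficulty.zip profit).length : Int) from hlen.symm]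
    rw [PySem.List.foldl_congr_mem _ _ _ _ hcongr]
    rw [PySem.List.foldl_pyRange_zero_pyGetD' (difficulty.zip profit) (0, 0) (pvStep w) 0]
    rw [PySem.List.foldl_congr_mem _ _ (fun m (_ : Int) => m) _ ?tail]
    · exact pvFoldl_id _ _
    case tail =>
      intro acc j hj
      rw [hlen] at hj
      obtain ⟨hj0, hj1⟩ := PySem.List.mem_pyRange_one.1 hj
      have h0 : (0 : Int) ≤ j := by omega
      have hjd : j < (difficulty.length : Int) := hj1
      rw [PySem.List.pyGetD_eq_getElem difficulty 0 h0 hjd]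
      have hmem : difficulty[j.toNat] ∈ difficulty.drop profit.length := by
        have hidx : j.toNat - profit.length < (difficulty.drop profit.length).length := by
          simp [List.length_drop]; omega
        have : (difficulty.drop profit.length)[j.toNat - profit.length] = difficulty[j.toNat] := by
          rw [List.getElem_drop]
          congr 1
          omega
        rw [← this]
        exact List.getElem_mem hidx
      rw [if_neg (hpre _ hmem)]

-- on the sorted job list, the prefix-max value at the bisection point is the filtered max
theorem pvBisect_eq (pairs : List (Int × Int)) (w : Int) :
    (let jobs := PySem.List.sorted pairs (fun t => t.1) false
     let ds := jobs.map (fun t => t.1)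
     let k := PySem.List.bisectRight ds w
     if k ≠ 0 then PySem.List.pyGetD (pvPrefMax 0 jobs) ((k : Int) - 1) 0 else 0)
    = pairs.foldl (pvStep w) 0 := by
  simp only
  set jobs := PySem.List.sorted pairs (fun t => t.1) false with hjobs
  set ds := jobs.map (fun t => t.1) with hds
  set k := PySem.List.bisectRight ds w with hk
  have hpw : List.Pairwise (fun a b => a ≤ b) ds :=
    List.pairwise_map.2 (PySem.List.sorted_pairwise pairs (fun t => t.1))
  obtain ⟨hk1, hk2, hk3⟩ := PySem.List.bisectRight_spec ds w hpw
  have hdl : ds.length = jobs.length := by simp [hds]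
  rw [← pvFoldl_perm w (PySem.List.sorted_perm pairs (fun t => t.1) false) 0]
  have hsplit : jobs.foldl (pvStep w) 0 = ((jobs.take k).map (fun t => t.2)).foldl max 0 := by
    have hgt : ∀ x ∈ jobs.drop k, ¬ x.1 ≤ w := by
      intro x hx
      obtain ⟨j, hj, rfl⟩ := List.mem_iff_getElem.1 hx
      rw [List.getElem_drop]
      have hlt : k + j < ds.length := by
        rw [hdl]
        have := hj
        simp [List.length_drop] at this
        omega
      have := hk3 (k + j) hlt (Nat.le_add_right k j)
      simp only [hds, List.getElem_map] at this
      omega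
    have hle : ∀ x ∈ jobs.take k, x.1 ≤ w := by
      intro x hx
      obtain ⟨j, hj, rfl⟩ := List.mem_iff_getElem.1 hx
      rw [List.getElem_take]
      have hjk : j < k := by
        have := hj
        simp [List.length_take] at this
        omega
      have hlt : j < ds.length := by
        rw [hdl]
        have := hj
        simp [List.length_take] at this
        omega
      have := hk2 j hlt hjk
      simpa only [hds, List.getElem_map] using this
    conv_lhs => rw [← List.take_append_drop k jobs]
    rw [List.foldl_append, pvFoldl_all_gt w _ _ hgt, pvFoldl_all_le w _ _ hle]
  rw [hsplit]
  by_cases hk0 : k = 0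
  · simp [hk0]
  · rw [if_pos hk0]
    have hklen : k ≤ jobs.length := by rw [← hdl]; exact hk1
    have h0 : (0 : Int) ≤ (k : Int) - 1 := by
      have : 1 ≤ k := Nat.one_le_iff_ne_zero.2 hk0
      omega
    have h1 : (k : Int) - 1 < ((pvPrefMax 0 jobs).length : Int) := by
      clear_value k ds jobs
      have hpl := pvPrefMax_length 0 jobs
      have : 1 ≤ k := Nat.one_le_iff_ne_zero.2 hk0
      omega
    rw [PySem.List.pyGetD_eq_getElem (pvPrefMax 0 jobs) 0 h0 h1]
    have htn : ((k : Int) - 1).toNat = k - 1 := by omega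
    have hk1' : k - 1 < jobs.length := by
      have : 1 ≤ k := Nat.one_le_iff_ne_zero.2 hk0
      omega
    have := pvPrefMax_getElem jobs 0 (k - 1) hk1' (by rw [pvPrefMax_length]; exact hk1')
    have h1k : 1 ≤ k := Nat.one_le_iff_ne_zero.2 hk0
    have hkk : k - 1 + 1 = k := by omega
    simp only [htn]
    rw [this, hkk]

theorem solution_514_5_spec : Claim_equal_solution_514_5 := by
  intro difficulty profit worker _ hpre
  unfold Spec_solution_514_5 solution_514_5 solution_514_5_alt
  rw [PySem.List.foldl_pyRange_zero_pyGetD' worker 0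
    (fun res w => res + (PySem.List.pyRange 0 difficulty.length 1).foldl (fun max_p j =>
      if PySem.List.pyGetD difficulty j 0 ≤ w then
        max max_p (PySem.List.pyGetD profit j 0)
      else max_p) 0) 0]
  simp only [pvBest_eq, List.nil_append]
  apply PySem.List.foldl_congr_mem
  intro acc w hw
  rw [pvInner_eq difficulty profit w (fun d hd => hpre d hd w hw)]
  rw [← pvBisect_eq (difficulty.zip profit) w]
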